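-- pv_equiv track=rewrite | github.com/Prior-Lab-Durham-University/carbonara | CarbonaraDataTools.py | find_flexible_linker_sections
-- ===== SOURCE A (Python) =====
-- from typing import List, Set
-- from typing import List, Set
-- from typing import List, Tuple
--
-- def find_flexible_linker_sections(ss_string: str, pae_flags: List[int]) -> Set[int]:
--     assert len(ss_string) == len(pae_flags), "Length of sequence and PAE list must match"
--
--     flexible_linker_indices = set()
--     i = 0
--     section_index = 0
--
--     while i < len(ss_string):
--         current_char = ss_string[i]
--         start = i
--
--         # Move i to the end of the current segment
--         while i < len(ss_string) and ss_string[i] == current_char: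
--             i += 1
--         end = i
--
--         # Check only if this section is a linker
--         if current_char == '-' and any(pae_flags[start:end]):
--             flexible_linker_indices.add(section_index)
--
--         section_index += 1
--
--     return flexible_linker_indices
-- ===== SOURCE B (Python) =====
-- from typing import List, Set
--
-- def find_flexible_linker_sections(ss_string: str, pae_flags: List[int]) -> Set[int]:
--     assert len(ss_string) == len(pae_flags), "Length of sequence and PAE list must match"
--
--     flexible_linker_indices = set()
--     section_index = 0
--     prev = None
--     flag_seen = False
--
--     for i, ch in enumerate(ss_string):
--         if prev is not None and ch != prev:
--             # a run just ended
--             if prev == '-' and flag_seen: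
--                 flexible_linker_indices.add(section_index)
--             section_index += 1
--             flag_seen = False
--         prev = ch
--         flag_seen = flag_seen or bool(pae_flags[i])
--
--     if prev is not None and prev == '-' and flag_seen:
--         flexible_linker_indices.add(section_index)
--
--     return flexible_linker_indices
-- ===== Notes on version B (the rewrite author's own statement) =====
-- stated objective: faster
-- what changed: Replaced A's nested while-loops with index arithmetic plus a slice-and-any() scan per segment by a single fused pass that tracks the current run's char and an OR-accumulated flag, flushing a section when the char changes and once at the end.
import Mathlib
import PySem

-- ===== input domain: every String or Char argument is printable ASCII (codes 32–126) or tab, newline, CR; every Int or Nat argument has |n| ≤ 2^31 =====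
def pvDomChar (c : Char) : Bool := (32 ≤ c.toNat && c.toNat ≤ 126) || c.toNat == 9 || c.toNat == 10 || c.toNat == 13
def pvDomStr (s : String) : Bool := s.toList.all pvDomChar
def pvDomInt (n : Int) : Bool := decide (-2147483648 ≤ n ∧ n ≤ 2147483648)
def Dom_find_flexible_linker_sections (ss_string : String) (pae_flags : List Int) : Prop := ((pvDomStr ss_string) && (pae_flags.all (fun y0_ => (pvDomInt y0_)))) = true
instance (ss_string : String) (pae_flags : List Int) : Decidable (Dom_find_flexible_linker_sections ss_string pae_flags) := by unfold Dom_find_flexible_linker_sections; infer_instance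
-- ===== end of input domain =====

-- B fuses A's nested run-finding while-loop and per-segment slice+any() scan into one
-- single pass carrying an OR-accumulated flag; return values proved equal under the length assert.

-- ===== PORT A =====
-- inner while loop: number of further chars equal to current_char (run continues for 1 + runLen chars)
def runLen (c : Char) : List Char → Nat
  | [] => 0
  | x :: xs => if x = c then runLen c xs + 1 else 0

-- outer while loop over the remaining chars/flags; sec = section_index, acc = flexible_linker_indices
def aLoop : List Char → List Int → Int → PySem.Set Int → PySem.Set Int
  | [], _, _, acc => acc
  | c :: cs, fs, sec, acc =>
    let k := runLen c cs
    let acc' := if c = '-' ∧ (fs.take (k + 1)).any (fun x => decide (x ≠ 0)) = true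
                then PySem.Set.add acc sec else acc
    aLoop (cs.drop k) (fs.drop (k + 1)) (sec + 1) acc'
termination_by cs => cs.length
decreasing_by simp

def find_flexible_linker_sections (ss_string : String) (pae_flags : List Int) : List Int :=
  aLoop ss_string.toList pae_flags 0 PySem.Set.empty

-- ===== PORT B =====
-- B's single fused pass: prev = previous char, flag = OR of pae flags seen in the current run.
-- The mismatched-lengths arm is unreachable under the assert (Pre_).
def bGo : List Char → List Int → Char → Bool → Int → PySem.Set Int → PySem.Set Int
  | [], _, prev, flag, sec, acc =>
      if prev = '-' ∧ flag = true then PySem.Set.add acc sec else acc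
  | _ :: _, [], _, _, _, acc => acc
  | c :: cs, f :: fs, prev, flag, sec, acc =>
      if c ≠ prev then
        bGo cs fs c (decide (f ≠ 0)) (sec + 1)
          (if prev = '-' ∧ flag = true then PySem.Set.add acc sec else acc)
      else
        bGo cs fs c (flag || decide (f ≠ 0)) sec acc

def find_flexible_linker_sections_alt (ss_string : String) (pae_flags : List Int) : List Int :=
  match ss_string.toList, pae_flags with
  | c :: cs, f :: fs => bGo cs fs c (decide (f ≠ 0)) 0 PySem.Set.empty
  | _, _ => PySem.Set.empty

-- ===== PRECONDITION & SPEC =====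
-- Pre_ excludes only inputs where the assert fails (AssertionError in both A and B).
def Pre_find_flexible_linker_sections (ss_string : String) (pae_flags : List Int) : Prop :=
  ss_string.toList.length = pae_flags.length
instance (ss_string : String) (pae_flags : List Int) : Decidable (Pre_find_flexible_linker_sections ss_string pae_flags) := by unfold Pre_find_flexible_linker_sections; infer_instance

def pvWitness_find_flexible_linker_sections : String × List Int := ("-H-", [1, 0, 0])

def Spec_find_flexible_linker_sections (ss_string : String) (pae_flags : List Int) (out : List Int) : Prop := out = find_flexible_linker_sections_alt ss_string pae_flags
instance (ss_string : String) (pae_flags : List Int) (out : List Int) : Decidable (Spec_find_flexible_linker_sections ss_string pae_flags out) := by unfold Spec_find_flexible_linker_sections; infer_instance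

-- ===== CLAIM (what is proved, stated in full; the proofs are below) =====
def Claim_equal_find_flexible_linker_sections : Prop := ∀ (ss_string : String) (pae_flags : List Int), Dom_find_flexible_linker_sections ss_string pae_flags → Pre_find_flexible_linker_sections ss_string pae_flags → Spec_find_flexible_linker_sections ss_string pae_flags (find_flexible_linker_sections ss_string pae_flags)

-- ===== LEMMAS AND PROOFS =====

lemma runLen_le (c : Char) (cs : List Char) : runLen c cs ≤ cs.length := by
  induction cs with
  | nil => simp [runLen]
  | cons x xs ih =>
    simp only [runLen]
    split
    · simpa using ih
    · simp

lemma mem_take_runLen (c : Char) (cs : List Char) :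
    ∀ x ∈ cs.take (runLen c cs), x = c := by
  induction cs with
  | nil => simp
  | cons y ys ih =>
    simp only [runLen]
    split
    · rename_i h
      rw [List.take_succ_cons]
      intro x hx
      rcases List.mem_cons.mp hx with rfl | hx
      · exact h
      · exact ih x hx
    · simp

lemma drop_runLen (c : Char) (cs : List Char) :
    cs.drop (runLen c cs) = [] ∨
    ∃ x rest, cs.drop (runLen c cs) = x :: rest ∧ x ≠ c := by
  induction cs with
  | nil => simp
  | cons y ys ih =>
    simp only [runLen]
    split
    · rw [List.drop_succ_cons]
      exact ih
    · rename_i h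
      exact Or.inr ⟨y, ys, rfl, h⟩

-- a run of chars equal to prev only ORs its flags into the accumulator
lemma bGo_run (cs : List Char) : ∀ (fs : List Int) (qs : List Char) (rs : List Int)
    (prev : Char) (flag : Bool) (sec : Int) (acc : PySem.Set Int),
    (∀ x ∈ cs, x = prev) → cs.length = fs.length →
    bGo (cs ++ qs) (fs ++ rs) prev flag sec acc
      = bGo qs rs prev (flag || fs.any (fun x => decide (x ≠ 0))) sec acc := by
  induction cs with
  | nil =>
    intro fs qs rs prev flag sec acc _ hlen
    have : fs = [] := List.eq_nil_of_length_eq_zero (by simpa using hlen.symm)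
    subst this; simp
  | cons c cs ih =>
    intro fs qs rs prev flag sec acc hall hlen
    match fs with
    | [] => simp at hlen
    | f :: fs' =>
      have hc : c = prev := hall c (by simp)
      simp only [List.cons_append, bGo, hc, ne_eq, not_true_eq_false, reduceIte]
      rw [ih fs' qs rs prev _ sec acc (fun x hx => hall x (by simp [hx])) (by simpa using hlen)]
      simp [Bool.or_assoc]

lemma main_lemma : ∀ (n : Nat) (cs : List Char) (fs : List Int) (sec : Int) (acc : PySem.Set Int),
    cs.length ≤ n → cs.length = fs.length →
    aLoop cs fs sec acc =
      (match cs, fs with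
       | c :: cs', f :: fs' => bGo cs' fs' c (decide (f ≠ 0)) sec acc
       | _, _ => acc) := by
  intro n
  induction n with
  | zero =>
    intro cs fs sec acc hle hlen
    have : cs = [] := List.eq_nil_of_length_eq_zero (Nat.le_zero.mp hle)
    subst this
    cases fs <;> rw [aLoop]
  | succ n ih =>
    intro cs fs sec acc hle hlen
    match cs, fs with
    | [], fs => cases fs <;> (rw [aLoop])
    | c :: cs', [] => simp at hlen
    | c :: cs', f :: fs' =>
      have hlen' : cs'.length = fs'.length := by simpa using hlen
      have hk := runLen_le c cs'
      rw [aLoop]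
      simp only [List.drop_succ_cons, List.take_succ_cons]
      set k := runLen c cs' with hkdef
      have hsplit :
          bGo cs' fs' c (decide (f ≠ 0)) sec acc
            = bGo (cs'.drop k) (fs'.drop k) c
                (decide (f ≠ 0) || (fs'.take k).any (fun x => decide (x ≠ 0))) sec acc := by
        conv_lhs => rw [← List.take_append_drop k cs', ← List.take_append_drop k fs']
        exact bGo_run (cs'.take k) (fs'.take k) (cs'.drop k) (fs'.drop k) c _ sec acc
          (mem_take_runLen c cs') (by simp; omega)
      rw [hsplit]
      rcases drop_runLen c cs' with hnil | ⟨x, rest, hx, hxc⟩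
      · rw [hnil]
        have hfs : fs'.drop k = [] := by
          apply List.eq_nil_of_length_eq_zero
          have h0 := congrArg List.length hnil
          simp at h0 ⊢
          omega
        rw [hfs, aLoop, bGo]
        simp
      · have hlend : (cs'.drop k).length = (fs'.drop k).length := by simp [hlen']
        rw [hx] at hlend
        match hgs : fs'.drop k with
        | [] => rw [hgs] at hlend; simp at hlend
        | g :: grest =>
          rw [hgs] at hlend
          rw [← hkdef] at hx
          rw [hx]
          rw [ih (x :: rest) (g :: grest) (sec + 1) _
              (by have h1 := congrArg List.length hx
                  simp at h1 hle ⊢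
                  omega)
              (by simpa using hlend)]
          simp [bGo, hxc]

-- ===== VERDICT (by name: the statement is the Claim_ definition above) =====
theorem find_flexible_linker_sections_spec : Claim_equal_find_flexible_linker_sections := by
  intro ss fs _ hpre
  unfold Spec_find_flexible_linker_sections
  unfold find_flexible_linker_sections find_flexible_linker_sections_alt
  rw [main_lemma ss.toList.length ss.toList fs 0 PySem.Set.empty le_rfl hpre]
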